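-- pv_equiv track=rewrite | github.com/jdadsm/AdventOfCode2023 | day12/part1.py | check_criteria
-- ===== SOURCE A (Python) =====
-- def check_criteria(comb,second):
--     last = "."
--     res = []
--     for i in range(len(comb)):
--         if comb[i] == "#":
--             if last == "#":
--                 res[-1] += 1
--             else:
--                 res.append(1)
--         last = comb[i]
--     return res == second
-- ===== SOURCE B (Python) =====
-- def check_criteria(comb, second):
--     # Pattern matcher driven by the target list: for each expected run length,
--     # jump to the next '#'-run with find, measure it with lstrip, and fail fast.
--     s = comb
--     for k in second:
--         p = s.find('#')
--         if p == -1: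
--             return False
--         s = s[p:]
--         rest = s.lstrip('#')
--         if k != len(s) - len(rest):
--             return False
--         s = rest
--     return s.find('#') == -1
-- ===== Notes on version B (the rewrite author's own statement) =====
-- stated objective: alternative
-- what changed: B does not build the run-length list at all: it is a matcher driven by the target list, consuming comb run by run (find the next '#', measure it with lstrip, fail fast on mismatch), where A scans char by char with (last,res) state, builds the full list and compares at the end.
import Mathlib
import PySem

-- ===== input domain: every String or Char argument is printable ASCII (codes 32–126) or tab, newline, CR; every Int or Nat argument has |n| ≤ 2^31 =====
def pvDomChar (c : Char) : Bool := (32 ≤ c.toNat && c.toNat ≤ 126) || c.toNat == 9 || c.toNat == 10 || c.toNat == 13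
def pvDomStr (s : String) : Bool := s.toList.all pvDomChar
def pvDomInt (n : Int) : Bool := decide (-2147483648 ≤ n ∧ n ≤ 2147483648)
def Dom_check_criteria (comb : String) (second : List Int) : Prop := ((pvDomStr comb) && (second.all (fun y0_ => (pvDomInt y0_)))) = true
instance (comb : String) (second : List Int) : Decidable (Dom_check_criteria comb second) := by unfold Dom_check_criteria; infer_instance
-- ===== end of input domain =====

-- B replaces A's stateful char-by-char scan that builds the full run-length list and
-- compares at the end by a matcher driven by the target list that consumes comb run by
-- run and fails fast (objective: alternative).


-- ===== PORT A =====
-- res[-1] += 1 (only reached with res nonempty, since last == '#')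
def pvIncLast : List Int → List Int
  | [] => []
  | [x] => [x + 1]
  | x :: xs => x :: pvIncLast xs

-- the loop body of A: update (last, res)
def pvStep (st : Char × List Int) (c : Char) : Char × List Int :=
  let res := if c = '#' then (if st.1 = '#' then pvIncLast st.2 else st.2 ++ [1]) else st.2
  (c, res)

def check_criteria (comb : String) (second : List Int) : Bool :=
  let st := comb.toList.foldl pvStep ('.', [])
  st.2 == second

-- ===== PORT B =====
-- B's for-loop over `second` with early returns, ported as structural recursion on the
-- list: s.find('#') == -1 iff dropping the non-'#' prefix leaves nothing; s[p:] (p the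
-- first '#') is dropWhile (· ≠ '#'); s.lstrip('#') is dropWhile (· = '#'); the run
-- length len(s) - len(rest) is the Nat subtraction of the two lengths. Exact on every input.
def pvMatch : List Char → List Int → Bool
  | s, [] => (s.dropWhile (· ≠ '#')).isEmpty
  | s, k :: rest =>
    let t := s.dropWhile (· ≠ '#')
    if t.isEmpty then false
    else
      let u := t.dropWhile (· = '#')
      if k == ((t.length - u.length : Nat) : Int) then pvMatch u rest else false

def check_criteria_alt (comb : String) (second : List Int) : Bool :=
  pvMatch comb.toList second

-- ===== PRECONDITION & SPEC =====
def Spec_check_criteria (comb : String) (second : List Int) (out : Bool) : Prop := out = check_criteria_alt comb second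
instance (comb : String) (second : List Int) (out : Bool) : Decidable (Spec_check_criteria comb second out) := by unfold Spec_check_criteria; infer_instance

-- ===== CLAIM (what is proved, stated in full; the proofs are below) =====
def Claim_equal_check_criteria : Prop := ∀ (comb : String) (second : List Int), Dom_check_criteria comb second → Spec_check_criteria comb second (check_criteria comb second)

-- ===== LEMMAS AND PROOFS =====

-- proof-only helper: the list of '#'-run lengths of s
def pvRuns : List Char → List Int
  | [] => []
  | c :: t =>
    if c = '#' then
      (1 + ((t.takeWhile (· = '#')).length : Int)) :: pvRuns (t.dropWhile (· = '#'))
    else pvRuns t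
termination_by l => l.length
decreasing_by
  · exact Nat.lt_succ_of_le (List.length_dropWhile_le _ _)
  · exact Nat.lt_succ_self _

theorem pvIncLast_append (res : List Int) (n : Int) :
    pvIncLast (res ++ [n]) = res ++ [n + 1] := by
  induction res with
  | nil => simp [pvIncLast]
  | cons x xs ih =>
    cases xs with
    | nil => simp [pvIncLast]
    | cons y ys => simpa [pvIncLast] using ih

theorem pvFold_main (l : List Char) :
    (∀ res last, last ≠ '#' →
      (l.foldl pvStep (last, res)).2 = res ++ pvRuns l) ∧
    (∀ (res0 : List Int) (n : Int),
      (l.foldl pvStep ('#', res0 ++ [n])).2 =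
        res0 ++ [n + ((l.takeWhile (· = '#')).length : Int)]
          ++ pvRuns (l.dropWhile (· = '#'))) := by
  induction l with
  | nil => constructor <;> intros <;> simp [pvRuns]
  | cons c t ih =>
    constructor
    · intro res last hlast
      by_cases hc : c = '#'
      · subst hc
        have h := ih.2 res 1
        simp only [List.foldl_cons, pvStep, if_true, if_neg hlast] at *
        rw [h]
        simp [pvRuns]
      · have h := ih.1 res c hc
        simp only [List.foldl_cons, pvStep, if_neg hc] at *
        rw [h, pvRuns]
        simp [hc]
    · intro res0 n
      by_cases hc : c = '#'
      · subst hc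
        have h := ih.2 res0 (n + 1)
        simp only [List.foldl_cons, pvStep, if_true, pvIncLast_append] at *
        rw [h]
        simp [List.takeWhile, List.dropWhile]
        ring_nf
      · have h := ih.1 (res0 ++ [n]) c hc
        simp only [List.foldl_cons, pvStep, if_neg hc] at *
        rw [h]
        have ht : (c :: t).takeWhile (· = '#') = [] := by simp [List.takeWhile, hc]
        have hd : (c :: t).dropWhile (· = '#') = c :: t := by simp [List.dropWhile, hc]
        rw [ht, hd, pvRuns]
        simp [hc]

-- skipping non-'#' characters does not change the runs
theorem pvRuns_dropWhile (s : List Char) :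
    pvRuns s = pvRuns (s.dropWhile (· ≠ '#')) := by
  induction s with
  | nil => rfl
  | cons c t ih =>
    by_cases hc : c = '#'
    · simp [List.dropWhile, hc]
    · rw [pvRuns, if_neg hc, ih]
      simp [List.dropWhile, hc]

-- the matcher decides equality with the run-length list
theorem pvMatch_eq_runs (ks : List Int) (s : List Char) :
    pvMatch s ks = (pvRuns s == ks) := by
  induction ks generalizing s with
  | nil =>
    rw [pvMatch, pvRuns_dropWhile s]
    cases ht : s.dropWhile (· ≠ '#') with
    | nil => simp [pvRuns]
    | cons c t =>
      have hc : c = '#' := by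
        have := List.head?_dropWhile_not (p := fun x => x ≠ '#') s
        rw [ht] at this; simpa using this
      subst hc
      rw [pvRuns]
      simp
  | cons k rest ih =>
    rw [pvMatch, pvRuns_dropWhile s]
    cases ht : s.dropWhile (· ≠ '#') with
    | nil => simp [pvRuns]
    | cons c t =>
      have hc : c = '#' := by
        have := List.head?_dropWhile_not (p := fun x => x ≠ '#') s
        rw [ht] at this; simpa using this
      subst hc
      have hlen : (('#' :: t).length - ((t.dropWhile (· = '#'))).length : Nat)
          = 1 + (t.takeWhile (· = '#')).length := by
        have hsum := congrArg List.length (List.takeWhile_append_dropWhile (p := (· = '#')) (l := t))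
        simp only [List.length_append] at hsum
        simp only [List.length_cons]
        omega
      have hd : ('#' :: t).dropWhile (· = '#') = t.dropWhile (· = '#') := by
        simp [List.dropWhile]
      rw [pvRuns]
      simp only [List.isEmpty_cons, Bool.false_eq_true, if_false, if_true, decide_true]
      rw [hd, hlen]
      push_cast
      by_cases hk : k = 1 + ((t.takeWhile (· = '#')).length : Int)
      · simp [hk, ih]
      · have h1 : (k == 1 + ((t.takeWhile (· = '#')).length : Int)) = false :=
          beq_eq_false_iff_ne.mpr hk
        have h0 : ((1 + ((t.takeWhile (· = '#')).length : Int)) == k) = false :=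
          beq_eq_false_iff_ne.mpr (fun h => hk h.symm)
        simp [h1, List.cons_beq_cons, h0]

-- ===== VERDICT (by name: the statement is the Claim_ definition above) =====
theorem check_criteria_spec : Claim_equal_check_criteria := by
  intro comb second _
  unfold Spec_check_criteria check_criteria check_criteria_alt
  have h := (pvFold_main comb.toList).1 [] '.' (by decide)
  rw [pvMatch_eq_runs]
  simp only [h, List.nil_append]
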